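-- pv_equiv track=rewrite | github.com/wronai/redsl | redsl/commands/doctor_fstring_fixers.py | _escape_fstring_body_braces
-- ===== SOURCE A (Python) =====
-- def _escape_fstring_body_braces(body: str) -> str:
--     """Escape unbalanced braces in f-string body content."""
--     result: list[str] = []
--     i = 0
--     while i < len(body):
--         if body[i] == '{':
--             if i + 1 < len(body) and body[i + 1] == '{':
--                 result.append('{{')
--                 i += 2
--             else:
--                 result.append('{{')
--                 i += 1
--         elif body[i] == '}':
--             if i + 1 < len(body) and body[i + 1] == '}':
--                 result.append('}}')
--                 i += 2
--             else:
--                 result.append('}}')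
--                 i += 1
--         else:
--             result.append(body[i])
--             i += 1
--     return "".join(result)
-- ===== SOURCE B (Python) =====
-- from itertools import groupby
--
--
-- def _escape_fstring_body_braces(body: str) -> str:
--     """Escape unbalanced braces in f-string body content (run-based)."""
--     out = []
--     for ch, grp in groupby(body):
--         n = sum(1 for _ in grp)
--         out.append(ch * (n + (n & 1)) if ch in "{}" else ch * n)
--     return "".join(out)
-- ===== Notes on version B (the rewrite author's own statement) =====
-- stated objective: alternative
-- what changed: Replaces A's index-based while loop with one-char lookahead by an itertools.groupby pass over maximal runs of equal characters, emitting each brace run rounded up to even length in one step.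
import Mathlib
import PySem

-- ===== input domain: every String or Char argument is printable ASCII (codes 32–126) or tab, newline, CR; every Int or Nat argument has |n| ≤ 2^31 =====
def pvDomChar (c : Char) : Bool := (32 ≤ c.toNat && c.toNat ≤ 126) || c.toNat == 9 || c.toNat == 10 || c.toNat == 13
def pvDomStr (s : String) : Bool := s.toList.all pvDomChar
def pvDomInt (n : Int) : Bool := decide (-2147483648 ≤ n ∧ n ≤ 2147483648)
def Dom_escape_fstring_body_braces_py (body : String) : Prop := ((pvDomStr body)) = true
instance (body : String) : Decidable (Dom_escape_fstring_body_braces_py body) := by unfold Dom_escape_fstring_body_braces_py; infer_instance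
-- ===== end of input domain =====

-- B re-implements the brace escaping over maximal runs of equal characters (groupby)
-- instead of A's char-by-char loop with one-char lookahead; objective: alternative decomposition.

-- ===== PORT A =====
-- A's while-loop with index i and lookahead at i+1, transcribed as structural recursion on the
-- char list; the `result` list of appended pieces is kept as a list of char lists, joined at the end.
def pvGoA : List Char → List (List Char)
  | [] => []
  | c :: rest =>
    if c = '{' then
      match rest with
      | c2 :: r2 => if c2 = '{' then ['{', '{'] :: pvGoA r2 else ['{', '{'] :: pvGoA (c2 :: r2)
      | [] => ['{', '{'] :: pvGoA []
    else if c = '}' then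
      match rest with
      | c2 :: r2 => if c2 = '}' then ['}', '}'] :: pvGoA r2 else ['}', '}'] :: pvGoA (c2 :: r2)
      | [] => ['}', '}'] :: pvGoA []
    else [c] :: pvGoA rest

def escape_fstring_body_braces_py (body : String) : String :=
  String.ofList (pvGoA body.toList).flatten

-- ===== PORT B =====
-- itertools.groupby: peel the maximal run of the head character, emit its piece
-- (brace runs rounded up to even length), recurse on what is left.
def pvGoB : List Char → List (List Char)
  | [] => []
  | c :: rest =>
    let n := (rest.takeWhile (· == c)).length
    (if c = '{' ∨ c = '}' then List.replicate ((n + 1) + (n + 1) % 2) c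
     else List.replicate (n + 1) c) :: pvGoB (rest.dropWhile (· == c))
termination_by l => l.length
decreasing_by
  have := (List.dropWhile_sublist (l := rest) (· == c)).length_le
  simp; omega

def escape_fstring_body_braces_py_alt (body : String) : String :=
  String.ofList (pvGoB body.toList).flatten

-- ===== PRECONDITION & SPEC =====
def Spec_escape_fstring_body_braces_py (body : String) (out : String) : Prop := out = escape_fstring_body_braces_py_alt body
instance (body : String) (out : String) : Decidable (Spec_escape_fstring_body_braces_py body out) := by unfold Spec_escape_fstring_body_braces_py; infer_instance

-- ===== CLAIM (what is proved, stated in full; the proofs are below) =====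
def Claim_equal_escape_fstring_body_braces_py : Prop := ∀ (body : String), Dom_escape_fstring_body_braces_py body → Spec_escape_fstring_body_braces_py body (escape_fstring_body_braces_py body)

-- ===== LEMMAS AND PROOFS =====

-- A on a run of a non-brace character copies it unchanged.
theorem pvGoA_nonbrace (c : Char) (hc1 : ¬ c = '{') (hc2 : ¬ c = '}') :
    ∀ (k : Nat) (t : List Char),
      (pvGoA (List.replicate k c ++ t)).flatten = List.replicate k c ++ (pvGoA t).flatten := by
  intro k
  induction k with
  | zero => intro t; simp
  | succ k ih =>
    intro t
    rw [List.replicate_succ, List.cons_append, pvGoA.eq_def]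
    simp [hc1, hc2, ih t]

-- A on a maximal run of m braces (t does not continue the run) emits m rounded up to even braces.
theorem pvGoA_brace (c : Char) (hc : c = '{' ∨ c = '}') :
    ∀ (m : Nat) (t : List Char), t.head? ≠ some c →
      (pvGoA (List.replicate m c ++ t)).flatten
        = List.replicate (m + m % 2) c ++ (pvGoA t).flatten := by
  intro m
  induction m using Nat.strong_induction_on with
  | _ m ih =>
    intro t ht
    match m with
    | 0 => simp
    | 1 =>
      rcases hc with hc | hc <;> subst hc
      · cases t with
        | nil => rw [pvGoA.eq_def]; simp [List.replicate]
        | cons d t' =>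
          have hd : ¬ d = '{' := by intro h; exact ht (by simp [h])
          rw [show List.replicate 1 '{' ++ d :: t' = '{' :: d :: t' by simp [List.replicate],
            pvGoA.eq_def]
          simp [hd, List.replicate]
      · cases t with
        | nil => rw [pvGoA.eq_def]; simp [List.replicate]
        | cons d t' =>
          have hd : ¬ d = '}' := by intro h; exact ht (by simp [h])
          rw [show List.replicate 1 '}' ++ d :: t' = '}' :: d :: t' by simp [List.replicate],
            pvGoA.eq_def]
          simp [hd, List.replicate]
    | (k + 2) =>
      have ihk := ih k (by omega) t ht
      have hrep : List.replicate (k + 2) c ++ t = c :: c :: (List.replicate k c ++ t) := by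
        simp [List.replicate_succ]
      have hcount : (k + 2) + (k + 2) % 2 = (k + k % 2) + 1 + 1 := by omega
      rcases hc with hc | hc <;> subst hc <;>
      · rw [hrep, pvGoA.eq_def, hcount, List.replicate_succ, List.replicate_succ]
        simp [ihk]

-- the head run peeled by B: the list decomposes into the run and a remainder
-- that does not continue the run
theorem pv_run_decomp (c : Char) (rest : List Char) :
    c :: rest = List.replicate ((rest.takeWhile (· == c)).length + 1) c
        ++ rest.dropWhile (· == c)
      ∧ (rest.dropWhile (· == c)).head? ≠ some c := by
  have htw : rest.takeWhile (· == c) = List.replicate (rest.takeWhile (· == c)).length c := by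
    apply List.eq_replicate_of_mem
    intro b hb
    simpa using List.mem_takeWhile_imp hb
  constructor
  · conv_lhs => rw [← List.takeWhile_append_dropWhile (p := (· == c)) (l := rest)]
    rw [List.replicate_succ]
    conv_rhs => rw [← htw]
    rfl
  · intro h
    cases hw : rest.dropWhile (· == c) with
    | nil => rw [hw] at h; simp at h
    | cons d t' =>
      rw [hw] at h
      simp only [List.head?_cons, Option.some.injEq] at h
      have hne : rest.dropWhile (· == c) ≠ [] := by simp [hw]
      have := List.head_dropWhile_not (· == c) (l := rest) hne
      simp only [hw] at this
      simp [h] at this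

theorem pv_flatten_eq (l : List Char) : (pvGoA l).flatten = (pvGoB l).flatten := by
  cases l with
  | nil => rw [pvGoA.eq_def, pvGoB.eq_def]
  | cons c rest =>
    obtain ⟨hdec, hhd⟩ := pv_run_decomp c rest
    have hrec := pv_flatten_eq (rest.dropWhile (· == c))
    rw [pvGoB.eq_def]
    simp only [List.flatten_cons]
    rw [← hrec]
    by_cases hc : c = '{' ∨ c = '}'
    · rw [if_pos hc]
      conv_lhs => rw [hdec]
      rw [pvGoA_brace c hc _ _ hhd]
    · rw [if_neg hc]
      rw [not_or] at hc
      conv_lhs => rw [hdec]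
      rw [pvGoA_nonbrace c hc.1 hc.2]
termination_by l.length
decreasing_by
  have := (List.dropWhile_sublist (l := rest) (· == c)).length_le
  simp; omega

-- ===== VERDICT (by name: the statement is the Claim_ definition above) =====
theorem escape_fstring_body_braces_py_spec : Claim_equal_escape_fstring_body_braces_py := by
  intro body _
  unfold Spec_escape_fstring_body_braces_py escape_fstring_body_braces_py escape_fstring_body_braces_py_alt
  rw [pv_flatten_eq]
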